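-- pv_equiv track=rewrite | github.com/varunkumar85199-maker/Study-Material-Redundancy-Analyser- | topic_analyzer.py | _gather_sentences_for_topic
-- ===== SOURCE A (Python) =====
-- def _gather_sentences_for_topic(
--     topic: str, file_sentences: dict[str, list[str]]
-- ) -> dict[str, list[str]]:
--
--     keywords = set(topic.lower().split())
--     group: dict[str, list[str]] = {}
--
--     for fname, sentences in file_sentences.items():
--         related = [
--             s for s in sentences
--             if any(kw in s.lower() for kw in keywords)
--         ]
--         if related:
--             group[fname] = related
--
--     return group
-- ===== SOURCE B (Python) =====
-- def _contains_keyword(low, full, prefixes):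
--     # Scan left to right; grow a candidate match only while it is still a
--     # prefix of some keyword (the prefix set acts as a trie), so the inner
--     # loop is bounded by the longest keyword, not by the number of keywords.
--     n = len(low)
--     for i in range(n):
--         for j in range(i + 1, n + 1):
--             piece = low[i:j]
--             if piece in full:
--                 return True
--             if piece not in prefixes:
--                 break
--     return False
--
--
-- def _gather_sentences_for_topic(
--     topic: str, file_sentences: dict[str, list[str]]
-- ) -> dict[str, list[str]]:
--     keywords = topic.lower().split()
--     full = set(keywords)
--     prefixes = {kw[:j] for kw in keywords for j in range(1, len(kw) + 1)}
--     picked = (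
--         (fname, [s for s in sentences if _contains_keyword(s.lower(), full, prefixes)])
--         for fname, sentences in file_sentences.items()
--     )
--     return {fname: related for fname, related in picked if related}
-- ===== Notes on version B (the rewrite author's own statement) =====
-- stated objective: alternative
-- what changed: B builds once a hash set of all keyword prefixes (a set-based trie) and scans each once-lowered sentence left to right, extending a candidate match only while it remains a keyword prefix, instead of one built-in substring search per keyword with the sentence re-lowered each time; the result is assembled by a dict comprehension over a generator instead of a loop mutating a dict. Pre_ excludes association lists with duplicate filenames, which represent no Python dict.
import Mathlib
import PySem

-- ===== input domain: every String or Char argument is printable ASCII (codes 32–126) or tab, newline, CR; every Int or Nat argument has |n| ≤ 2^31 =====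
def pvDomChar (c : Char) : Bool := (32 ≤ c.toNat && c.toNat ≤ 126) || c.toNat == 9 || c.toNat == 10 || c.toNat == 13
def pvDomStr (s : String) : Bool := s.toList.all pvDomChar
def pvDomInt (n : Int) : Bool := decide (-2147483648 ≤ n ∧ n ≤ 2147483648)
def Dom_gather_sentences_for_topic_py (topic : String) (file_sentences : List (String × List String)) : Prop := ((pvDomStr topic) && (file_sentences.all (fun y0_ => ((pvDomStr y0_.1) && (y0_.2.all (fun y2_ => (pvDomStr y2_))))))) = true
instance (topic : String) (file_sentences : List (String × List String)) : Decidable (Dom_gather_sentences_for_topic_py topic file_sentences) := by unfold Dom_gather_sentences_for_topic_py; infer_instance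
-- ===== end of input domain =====

-- B builds a set of all keyword prefixes once (a set-based trie) and scans each once-lowered
-- sentence left to right, growing a candidate match only while it stays a keyword prefix,
-- instead of one built-in substring search per keyword; alternative structure, no speed claim.

-- ===== PORT A =====
def gather_sentences_for_topic_py (topic : String) (file_sentences : List (String × List String)) : List (String × List String) :=
  let keywords : PySem.Set String := PySem.Set.ofList (PySem.Str.split₀ (PySem.Str.lower topic))
  let group : PySem.Dict String (List String) :=
    file_sentences.foldl (fun g p =>
      let related := p.2.filter (fun s => keywords.any (fun kw => PySem.Str.isIn kw (PySem.Str.lower s)))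
      if related.isEmpty then g else g.insert p.1 related) PySem.Dict.empty
  group.items

-- ===== PORT B =====
-- B's inner loop 'for j in range(i+1, n+1): ... break' as structural recursion on j
def pvInner (low : List Char) (full prefixes : PySem.Set (List Char)) (i j : Nat) : Bool :=
  if j ≤ low.length then
    let piece := PySem.List.slice low (some (i : Int)) (some (j : Int))
    if full.contains piece then true
    else if prefixes.contains piece then pvInner low full prefixes i (j + 1)
    else false
  else false
termination_by low.length + 1 - j

-- B's helper _contains_keyword: outer loop 'for i in range(n)'
def pvContainsKeyword (low : List Char) (full prefixes : PySem.Set (List Char)) : Bool :=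
  (List.range low.length).any (fun i => pvInner low full prefixes i (i + 1))

def gather_sentences_for_topic_py_alt (topic : String) (file_sentences : List (String × List String)) : List (String × List String) :=
  let keywords := PySem.Chars.split₀ (PySem.Chars.lower topic.toList)
  let full : PySem.Set (List Char) := PySem.Set.ofList keywords
  let prefixes : PySem.Set (List Char) :=
    PySem.Set.ofList (keywords.flatMap (fun kw =>
      (PySem.List.pyRange 1 ((kw.length : Int) + 1) 1).map (fun j => PySem.List.slice kw none (some j))))
  let picked := file_sentences.map (fun p =>
    (p.1, p.2.filter (fun s => pvContainsKeyword (PySem.Chars.lower s.toList) full prefixes)))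
  picked.filter (fun p => !p.2.isEmpty)

-- ===== PRECONDITION & SPEC =====
-- Pre_ excludes association lists with repeated filenames: they represent no Python dict (A's
-- parameter is a dict, whose keys are necessarily distinct), so A's overwrite-in-place behaviour
-- there is never exercised by any real call.
def pvNodupKeys : List String → Bool
  | [] => true
  | k :: rest => !(rest.contains k) && pvNodupKeys rest

def Pre_gather_sentences_for_topic_py (topic : String) (file_sentences : List (String × List String)) : Prop :=
  pvNodupKeys (file_sentences.map Prod.fst) = true

instance (topic : String) (file_sentences : List (String × List String)) : Decidable (Pre_gather_sentences_for_topic_py topic file_sentences) := by unfold Pre_gather_sentences_for_topic_py; infer_instance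

def pvWitness_gather_sentences_for_topic_py : String × (List (String × List String)) :=
  ("ab", [("f", ["xab", "z"]), ("g", ["q"])])

def Spec_gather_sentences_for_topic_py (topic : String) (file_sentences : List (String × List String)) (out : List (String × List String)) : Prop := out = gather_sentences_for_topic_py_alt topic file_sentences
instance (topic : String) (file_sentences : List (String × List String)) (out : List (String × List String)) : Decidable (Spec_gather_sentences_for_topic_py topic file_sentences out) := by unfold Spec_gather_sentences_for_topic_py; infer_instance

-- ===== CLAIM (what is proved, stated in full; the proofs are below) =====
def Claim_equal_gather_sentences_for_topic_py : Prop := ∀ (topic : String) (file_sentences : List (String × List String)), Dom_gather_sentences_for_topic_py topic file_sentences → Pre_gather_sentences_for_topic_py topic file_sentences → Spec_gather_sentences_for_topic_py topic file_sentences (gather_sentences_for_topic_py topic file_sentences)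

-- ===== LEMMAS AND PROOFS =====

theorem pv_infix_iff_drop (l₁ l₂ : List Char) : l₁ <:+: l₂ ↔ ∃ i ≤ l₂.length, l₁ <+: l₂.drop i := by
  constructor
  · rintro ⟨s, t, rfl⟩
    exact ⟨s.length, by simp, by simp⟩
  · rintro ⟨i, hi, hp⟩
    exact hp.isInfix.trans (l₂.drop_suffix i).isInfix

theorem pv_split₀_go_ne_nil : ∀ (s cur : List Char) (acc : List (List Char)),
    (∀ w ∈ acc, w ≠ []) → ∀ w ∈ PySem.Chars.split₀.go s cur acc, w ≠ [] := by
  intro s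
  induction s with
  | nil =>
    intro cur acc hacc w hw
    by_cases hc : cur.isEmpty
    · simp only [PySem.Chars.split₀.go, hc, if_true] at hw
      exact hacc w (List.mem_reverse.1 hw)
    · simp only [PySem.Chars.split₀.go, hc, Bool.false_eq_true, if_false] at hw
      rcases List.mem_cons.1 (List.mem_reverse.1 hw) with rfl | h
      · simpa [List.isEmpty_iff] using hc
      · exact hacc w h
  | cons c rest ih =>
    intro cur acc hacc w hw
    by_cases hsp : PySem.Chars.isspace c
    · by_cases hc : cur.isEmpty
      · simp only [PySem.Chars.split₀.go, hsp, hc, if_true] at hw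
        exact ih [] acc hacc w hw
      · simp only [PySem.Chars.split₀.go, hsp, hc, Bool.false_eq_true, if_false, if_true] at hw
        refine ih [] (cur.reverse :: acc) ?_ w hw
        rintro w' hw'
        rcases List.mem_cons.1 hw' with rfl | h
        · simpa [List.isEmpty_iff] using hc
        · exact hacc w' h
    · simp only [PySem.Chars.split₀.go, hsp, Bool.false_eq_true, if_false] at hw
      exact ih (c :: cur) acc hacc w hw

theorem pv_split₀_ne_nil (s : List Char) : ∀ w ∈ PySem.Chars.split₀ s, w ≠ [] :=
  pv_split₀_go_ne_nil s [] [] (by simp)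

theorem pv_contains_iff {s : PySem.Set (List Char)} {x : List Char} :
    PySem.Set.contains s x = true ↔ x ∈ s := by
  simp [PySem.Set.contains]

theorem pv_slice_take (low : List Char) (i j : Nat) :
    PySem.List.slice low (some (i : Int)) (some (j : Int)) = (low.drop i).take (j - i) :=
  PySem.List.slice_natCast low i j

theorem pv_inner_sound (low : List Char) (kws : List (List Char))
    (prefixes : PySem.Set (List Char)) (i j : Nat)
    (h : pvInner low (PySem.Set.ofList kws) prefixes i j = true) :
    ∃ kw ∈ kws, kw <:+: low := by
  fun_induction pvInner low (PySem.Set.ofList kws) prefixes i j with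
  | case1 j hj piece hfull =>
    refine ⟨piece, (PySem.Set.mem_ofList kws piece).1 (pv_contains_iff.1 hfull), ?_⟩
    show PySem.List.slice low (some (i : Int)) (some (j : Int)) <:+: low
    rw [pv_slice_take]
    exact ((low.drop i).take_prefix (j - i)).isInfix.trans (low.drop_suffix i).isInfix
  | case2 j hj piece hfull hpre ih => exact ih h
  | case3 j hj piece hfull hpre => simp at h
  | case4 j hj => simp at h

theorem pv_inner_complete (low kw : List Char) (kws : List (List Char))
    (prefixes : PySem.Set (List Char))
    (hkw : kw ∈ kws) (hne : kw ≠ [])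
    (hprefixes : ∀ j', 1 ≤ j' → j' ≤ kw.length → prefixes.contains (kw.take j') = true)
    (i : Nat) (hpre : kw <+: low.drop i) :
    ∀ (j : Nat), i + 1 ≤ j → j ≤ i + kw.length →
      pvInner low (PySem.Set.ofList kws) prefixes i j = true := by
  have hkl : 1 ≤ kw.length := List.length_pos_iff.2 hne
  have hlen : kw.length ≤ low.length - i := by
    have := hpre.length_le
    simpa using this
  have hlow : i + kw.length ≤ low.length := by omega
  obtain ⟨r, hr⟩ := hpre
  have hpiece : ∀ j, j ≤ i + kw.length →
      PySem.List.slice low (some (i : Int)) (some (j : Int)) = kw.take (j - i) := by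
    intro j hj
    rw [pv_slice_take, ← hr, List.take_append_of_le_length (by omega)]
  suffices h : ∀ n j, i + kw.length - j ≤ n → i + 1 ≤ j → j ≤ i + kw.length →
      pvInner low (PySem.Set.ofList kws) prefixes i j = true by
    intro j hj1 hj2; exact h (i + kw.length - j) j le_rfl hj1 hj2
  intro n
  induction n with
  | zero =>
    intro j hn hj1 hj2
    have hje : j = i + kw.length := by omega
    subst hje
    rw [pvInner, if_pos (show i + kw.length ≤ low.length by omega)]
    simp only [hpiece (i + kw.length) le_rfl]
    have htake : kw.take (i + kw.length - i) = kw := by simp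
    rw [htake, if_pos (pv_contains_iff.2 ((PySem.Set.mem_ofList kws kw).2 hkw))]
  | succ n ih =>
    intro j hn hj1 hj2
    rw [pvInner, if_pos (show j ≤ low.length by omega)]
    simp only [hpiece j hj2]
    by_cases hfull : (PySem.Set.ofList kws).contains (kw.take (j - i)) = true
    · rw [if_pos hfull]
    · by_cases hje : j = i + kw.length
      · exfalso
        apply hfull
        have htake : kw.take (j - i) = kw := by rw [hje]; simp
        rw [htake]
        exact pv_contains_iff.2 ((PySem.Set.mem_ofList kws kw).2 hkw)
      · rw [if_neg hfull, if_pos (hprefixes (j - i) (by omega) (by omega))]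
        exact ih (j + 1) (by omega) (by omega) (by omega)

theorem pv_mem_prefixes (kws : List (List Char)) (kw : List Char) (hkw : kw ∈ kws)
    (j : Nat) (h1 : 1 ≤ j) (h2 : j ≤ kw.length) :
    PySem.Set.contains (PySem.Set.ofList (kws.flatMap (fun kw =>
      (PySem.List.pyRange 1 ((kw.length : Int) + 1) 1).map
        (fun j => PySem.List.slice kw none (some j))))) (kw.take j) = true := by
  apply pv_contains_iff.2
  rw [PySem.Set.mem_ofList]
  apply List.mem_flatMap.2
  refine ⟨kw, hkw, List.mem_map.2 ⟨(j : Int), ?_, ?_⟩⟩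
  · exact (PySem.List.mem_pyRange_one).2 ⟨by exact_mod_cast h1, by omega⟩
  · rw [PySem.List.slice_to_natCast]

theorem pv_contains_keyword_iff (low : List Char) (kws : List (List Char))
    (hne : ∀ kw ∈ kws, kw ≠ []) :
    pvContainsKeyword low (PySem.Set.ofList kws)
        (PySem.Set.ofList (kws.flatMap (fun kw =>
          (PySem.List.pyRange 1 ((kw.length : Int) + 1) 1).map
            (fun j => PySem.List.slice kw none (some j))))) = true
      ↔ ∃ kw ∈ kws, kw <:+: low := by
  unfold pvContainsKeyword
  simp only [List.any_eq_true, List.mem_range]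
  constructor
  · rintro ⟨i, _, hinner⟩
    exact pv_inner_sound low kws _ i (i + 1) hinner
  · rintro ⟨kw, hkw, hinf⟩
    obtain ⟨i, hi, hp⟩ := (pv_infix_iff_drop kw low).1 hinf
    have hkl : 1 ≤ kw.length := List.length_pos_iff.2 (hne kw hkw)
    have hlen : kw.length ≤ low.length - i := by simpa using hp.length_le
    refine ⟨i, by omega, ?_⟩
    exact pv_inner_complete low kw kws _ hkw (hne kw hkw)
      (fun j' hj1 hj2 => pv_mem_prefixes kws kw hkw j' hj1 hj2) i hp (i + 1) le_rfl (by omega)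

theorem pv_pred_eq (topic s : String) :
    (PySem.Set.ofList (PySem.Str.split₀ (PySem.Str.lower topic))).any
        (fun kw => PySem.Str.isIn kw (PySem.Str.lower s))
      = pvContainsKeyword (PySem.Chars.lower s.toList)
          (PySem.Set.ofList (PySem.Chars.split₀ (PySem.Chars.lower topic.toList)))
          (PySem.Set.ofList ((PySem.Chars.split₀ (PySem.Chars.lower topic.toList)).flatMap (fun kw =>
            (PySem.List.pyRange 1 ((kw.length : Int) + 1) 1).map
              (fun j => PySem.List.slice kw none (some j))))) := by
  have hmapeq : (PySem.Str.split₀ (PySem.Str.lower topic)).map String.toList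
      = PySem.Chars.split₀ (PySem.Chars.lower topic.toList) := by
    rw [PySem.Str.split₀_map_toList]
    simp [PySem.Str.toList_lower]
  have hA : ((PySem.Set.ofList (PySem.Str.split₀ (PySem.Str.lower topic))).any
        (fun kw => PySem.Str.isIn kw (PySem.Str.lower s)) = true)
      ↔ ∃ kw ∈ PySem.Chars.split₀ (PySem.Chars.lower topic.toList),
          kw <:+: PySem.Chars.lower s.toList := by
    simp only [List.any_eq_true]
    constructor
    · rintro ⟨kw, hm, hin⟩
      refine ⟨kw.toList, ?_, ?_⟩
      · rw [← hmapeq]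
        exact List.mem_map_of_mem ((PySem.Set.mem_ofList _ kw).1 hm)
      · have := (PySem.Str.isIn_iff_infix _ _).1 hin
        simpa [PySem.Str.toList_lower] using this
    · rintro ⟨cs, hm, hin⟩
      rw [← hmapeq] at hm
      obtain ⟨kw, hkwm, rfl⟩ := List.mem_map.1 hm
      refine ⟨kw, (PySem.Set.mem_ofList _ kw).2 hkwm, ?_⟩
      rw [PySem.Str.isIn_iff_infix]
      simpa [PySem.Str.toList_lower] using hin
  have hB := pv_contains_keyword_iff (PySem.Chars.lower s.toList)
    (PySem.Chars.split₀ (PySem.Chars.lower topic.toList))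
    (fun kw h => pv_split₀_ne_nil _ kw h)
  by_cases h : pvContainsKeyword (PySem.Chars.lower s.toList)
      (PySem.Set.ofList (PySem.Chars.split₀ (PySem.Chars.lower topic.toList)))
      (PySem.Set.ofList ((PySem.Chars.split₀ (PySem.Chars.lower topic.toList)).flatMap (fun kw =>
        (PySem.List.pyRange 1 ((kw.length : Int) + 1) 1).map
          (fun j => PySem.List.slice kw none (some j))))) = true
  · rw [h, hA.2 (hB.1 h)]
  · have := mt hA.1 (h ∘ hB.2)
    simp only [Bool.not_eq_true] at h this
    rw [h, this]

theorem pv_nodupKeys_iff (l : List String) : pvNodupKeys l = true ↔ l.Nodup := by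
  induction l with
  | nil => simp [pvNodupKeys]
  | cons k rest ih => simp [pvNodupKeys, ih, List.nodup_cons]

-- the grouping loop over fresh distinct keys appends exactly B's map+filter rows
theorem pv_fold_items (f : String → Bool) :
    ∀ (l : List (String × List String)) (d : PySem.Dict String (List String)),
      (∀ k ∈ l.map Prod.fst, d.contains k = false) → (l.map Prod.fst).Nodup →
      (l.foldl (fun g p =>
          let related := p.2.filter f
          if related.isEmpty then g else g.insert p.1 related) d).items
        = d.items ++ ((l.map (fun p => (p.1, p.2.filter f))).filter (fun p => !p.2.isEmpty)) := by
  intro l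
  induction l with
  | nil => intro d _ _; simp
  | cons p t ih =>
    intro d hfresh hnd
    simp only [List.map_cons, List.nodup_cons] at hnd
    simp only [List.foldl_cons, List.map_cons, List.filter_cons]
    by_cases he : (p.2.filter f).isEmpty
    · rw [he]
      simp only [if_true]
      rw [ih d (fun k hk => hfresh k (by simp [hk])) hnd.2]
      rw [List.isEmpty_iff] at he
      rw [he]
      simp
    · rw [Bool.not_eq_true] at he
      rw [he]
      simp only [Bool.false_eq_true, if_false, Bool.not_false, if_true]
      rw [ih (d.insert p.1 (p.2.filter f))
          (fun k hk => by
            rw [PySem.Dict.contains_insert]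
            have hne : k ≠ p.1 := fun h => hnd.1 (h ▸ hk)
            simp [hne, hfresh k (by simp [hk])])
          hnd.2]
      rw [PySem.Dict.items_insert_of_not_contains d _ (hfresh p.1 (by simp))]
      simp

-- ===== VERDICT (by name: the statement is the Claim_ definition above) =====
theorem gather_sentences_for_topic_py_spec : Claim_equal_gather_sentences_for_topic_py := by
  intro topic file_sentences _ hpre
  have hnd : (file_sentences.map Prod.fst).Nodup := (pv_nodupKeys_iff _).1 hpre
  unfold Spec_gather_sentences_for_topic_py gather_sentences_for_topic_py gather_sentences_for_topic_py_alt
  dsimp only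
  have hf : (fun s => (PySem.Set.ofList (PySem.Str.split₀ (PySem.Str.lower topic))).any
        (fun kw => PySem.Str.isIn kw (PySem.Str.lower s)))
      = (fun s => pvContainsKeyword (PySem.Chars.lower s.toList)
          (PySem.Set.ofList (PySem.Chars.split₀ (PySem.Chars.lower topic.toList)))
          (PySem.Set.ofList ((PySem.Chars.split₀ (PySem.Chars.lower topic.toList)).flatMap (fun kw =>
            (PySem.List.pyRange 1 ((kw.length : Int) + 1) 1).map
              (fun j => PySem.List.slice kw none (some j)))))) :=
    funext (fun s => pv_pred_eq topic s)
  rw [hf, pv_fold_items _ file_sentences PySem.Dict.empty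
      (fun k _ => PySem.Dict.contains_empty k) hnd]
  rw [show (PySem.Dict.empty : PySem.Dict String (List String)).items = [] from rfl,
      List.nil_append]
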